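-- pv_equiv track=rewrite | github.com/joelabreurojas/dbfxsql | dbfxsql/helpers/formatters.py | classify_operations
-- ===== SOURCE A (Python) =====
-- def classify_operations(residual_tables: tuple) -> list:
--     operations: list = []
--
--     for residual_table in residual_tables:
--         origin, destiny = residual_table
--
--         origin_range: int = len(origin)
--         destiny_range: int = len(destiny)
--
--         insert: list = [{"fields": row["fields"]} for row in origin[destiny_range:]]
--
--         delete: list = [{"index": row["index"]} for row in destiny[origin_range:]]
--
--         update: list = [
--             {"index": destiny_row["index"], "fields": origin_row["fields"]}
--             for origin_row, destiny_row in zip(origin, destiny)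
--         ]
--
--         operations.append({"insert": insert, "update": update, "delete": delete})
--
--     return operations
-- ===== SOURCE B (Python) =====
-- from itertools import zip_longest
--
--
-- def classify_operations(residual_tables: tuple) -> list:
--     operations: list = []
--
--     for origin, destiny in residual_tables:
--         insert, update, delete = [], [], []
--
--         for origin_row, destiny_row in zip_longest(origin, destiny, fillvalue=None):
--             if origin_row is not None and destiny_row is not None:
--                 update.append(
--                     {"index": destiny_row["index"], "fields": origin_row["fields"]}
--                 )
--             elif origin_row is not None:
--                 insert.append({"fields": origin_row["fields"]})
--             else:
--                 delete.append({"index": destiny_row["index"]})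
--
--         operations.append({"insert": insert, "update": update, "delete": delete})
--
--     return operations
-- ===== Notes on version B (the rewrite author's own statement) =====
-- stated objective: alternative
-- what changed: Three per-table passes (a slice comprehension for insert, one for delete, and a zip comprehension for update) are replaced by a single branching loop over itertools.zip_longest that maintains the three lists at once.
import Mathlib
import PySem

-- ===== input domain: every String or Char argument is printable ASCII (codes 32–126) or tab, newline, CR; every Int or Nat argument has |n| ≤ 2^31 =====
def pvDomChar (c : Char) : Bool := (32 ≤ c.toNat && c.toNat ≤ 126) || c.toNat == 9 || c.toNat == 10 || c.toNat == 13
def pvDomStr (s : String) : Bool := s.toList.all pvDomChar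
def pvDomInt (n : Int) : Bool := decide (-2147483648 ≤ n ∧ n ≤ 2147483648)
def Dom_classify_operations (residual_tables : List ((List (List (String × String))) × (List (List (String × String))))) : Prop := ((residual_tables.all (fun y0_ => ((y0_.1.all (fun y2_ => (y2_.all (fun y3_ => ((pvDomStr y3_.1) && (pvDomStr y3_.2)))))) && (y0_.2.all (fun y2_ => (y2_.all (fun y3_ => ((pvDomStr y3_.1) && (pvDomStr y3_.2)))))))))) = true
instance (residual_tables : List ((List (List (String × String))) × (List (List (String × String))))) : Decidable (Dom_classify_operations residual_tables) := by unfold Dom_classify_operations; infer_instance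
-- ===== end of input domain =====

-- B replaces A's three per-table passes (two tail-slice comprehensions and a zip comprehension)
-- by a single branching loop over the zip_longest pairing that maintains the three lists at once;
-- alternative decomposition, same cost. Equivalence is proved on Pre_ (every origin row has a
-- "fields" key, every destiny row an "index" key), exactly where Python A returns without KeyError.

-- ===== PORT A =====
-- row[k] on a dict row: first-match lookup; Pre_ guarantees the key is present, the "" default is never reached inside Pre_
def pvRowGet (row : List (String × String)) (k : String) : String :=
  ((row.find? (fun p => p.1 == k)).map (·.2)).getD ""

def classify_operations (residual_tables : List ((List (List (String × String))) × (List (List (String × String))))) : List (List (String × List (List (String × String)))) :=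
  -- for … append ⇒ map; origin[destiny_range:] with a non-negative length index is exactly List.drop
  residual_tables.map (fun residual_table =>
    let origin := residual_table.1
    let destiny := residual_table.2
    let insert := (origin.drop destiny.length).map (fun row => [("fields", pvRowGet row "fields")])
    let delete := (destiny.drop origin.length).map (fun row => [("index", pvRowGet row "index")])
    let update := (origin.zip destiny).map (fun p => [("index", pvRowGet p.2 "index"), ("fields", pvRowGet p.1 "fields")])
    [("insert", insert), ("update", update), ("delete", delete)])

-- ===== PORT B =====
-- the zip_longest loop: one simultaneous recursion over both lists, appending (here: consing after
-- the recursive call, which keeps the append order) to whichever of the three lists the branch picks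
def pvPairLoop (origin destiny : List (List (String × String))) :
    List (List (String × String)) × List (List (String × String)) × List (List (String × String)) :=
  match origin, destiny with
  | [], [] => ([], [], [])
  | o :: os, d :: ds =>
      let r := pvPairLoop os ds
      (r.1, [("index", pvRowGet d "index"), ("fields", pvRowGet o "fields")] :: r.2.1, r.2.2)
  | o :: os, [] =>
      let r := pvPairLoop os []
      ([("fields", pvRowGet o "fields")] :: r.1, r.2.1, r.2.2)
  | [], d :: ds =>
      let r := pvPairLoop [] ds
      (r.1, r.2.1, [("index", pvRowGet d "index")] :: r.2.2)

def classify_operations_alt (residual_tables : List ((List (List (String × String))) × (List (List (String × String))))) : List (List (String × List (List (String × String)))) :=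
  residual_tables.map (fun residual_table =>
    let r := pvPairLoop residual_table.1 residual_table.2
    [("insert", r.1), ("update", r.2.1), ("delete", r.2.2)])

-- ===== PRECONDITION & SPEC =====
-- Pre_ excludes exactly the inputs where Python A raises KeyError: an origin row without a
-- "fields" key or a destiny row without an "index" key.
def Pre_classify_operations (residual_tables : List ((List (List (String × String))) × (List (List (String × String))))) : Prop :=
  (residual_tables.all (fun t =>
    t.1.all (fun row => row.any (fun p => p.1 == "fields")) &&
    t.2.all (fun row => row.any (fun p => p.1 == "index")))) = true
instance (residual_tables : List ((List (List (String × String))) × (List (List (String × String))))) : Decidable (Pre_classify_operations residual_tables) := by unfold Pre_classify_operations; infer_instance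

def pvWitness_classify_operations : (List ((List (List (String × String))) × (List (List (String × String))))) :=
  [([[("fields", "a1")], [("fields", "a2")]], [[("index", "1")]])]

def Spec_classify_operations (residual_tables : List ((List (List (String × String))) × (List (List (String × String))))) (out : List (List (String × List (List (String × String))))) : Prop := out = classify_operations_alt residual_tables
instance (residual_tables : List ((List (List (String × String))) × (List (List (String × String))))) (out : List (List (String × List (List (String × String))))) : Decidable (Spec_classify_operations residual_tables out) := by unfold Spec_classify_operations; infer_instance

-- ===== CLAIM (what is proved, stated in full; the proofs are below) =====
def Claim_equal_classify_operations : Prop := ∀ (residual_tables : List ((List (List (String × String))) × (List (List (String × String))))), Dom_classify_operations residual_tables → Pre_classify_operations residual_tables → Spec_classify_operations residual_tables (classify_operations residual_tables)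

-- ===== LEMMAS AND PROOFS =====

-- the single zip_longest pass computes exactly A's three comprehensions
theorem pvPairLoop_eq (origin destiny : List (List (String × String))) :
    pvPairLoop origin destiny =
      ((origin.drop destiny.length).map (fun row => [("fields", pvRowGet row "fields")]),
       (origin.zip destiny).map (fun p => [("index", pvRowGet p.2 "index"), ("fields", pvRowGet p.1 "fields")]),
       (destiny.drop origin.length).map (fun row => [("index", pvRowGet row "index")])) := by
  induction origin generalizing destiny with
  | nil =>
      induction destiny with
      | nil => simp [pvPairLoop]
      | cons d ds ih => simp [pvPairLoop, ih]
  | cons o os ih =>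
      cases destiny with
      | nil => simp [pvPairLoop, ih []]
      | cons d ds => simp [pvPairLoop, ih ds]

-- ===== VERDICT (by name: the statement is the Claim_ definition above) =====
theorem classify_operations_spec : Claim_equal_classify_operations := by
  intro rts _ _
  unfold Spec_classify_operations classify_operations classify_operations_alt
  refine List.map_congr_left (fun t _ => ?_)
  simp [pvPairLoop_eq]
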